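-- pv_equiv track=rewrite | github.com/jskim-research/PythonAlgorithm | programmers/level2/N2ArrayCut.py | solution
-- ===== SOURCE A (Python) =====
-- def solution(n, left, right):
--     answer = []
--
--     for cur in range(left, right + 1):
--         i = cur // n
--         j = cur % n
--         if i == j:
--             answer.append(i + 1)
--         else:
--             answer.append(max(i, j) + 1)
--
--     return answer
-- ===== SOURCE B (Python) =====
-- def solution(n, left, right):
--     # Row-wise decomposition: walk the matrix rows covered by [left, right]
--     # instead of decoding every flat index with // and %.
--     answer = []
--     start_row = left // n
--     end_row = right // n
--     for i in range(start_row, end_row + 1):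
--         col_lo = left % n if i == start_row else 0
--         col_hi = right % n if i == end_row else n - 1
--         for j in range(col_lo, col_hi + 1):
--             answer.append(max(i, j) + 1)
--     return answer
-- ===== Notes on version B (the rewrite author's own statement) =====
-- stated objective: alternative
-- what changed: Replaces the single flat-index loop that decodes every index with // and % by a nested row/column traversal that computes the divmod bounds once per row.
-- outside the precondition, e.g. on solution(-3, 0, 2): A returns [1, 0, 0], B returns []; on solution(0, 0, 1): A raises ZeroDivisionError, B raises ZeroDivisionError
import Mathlib
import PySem

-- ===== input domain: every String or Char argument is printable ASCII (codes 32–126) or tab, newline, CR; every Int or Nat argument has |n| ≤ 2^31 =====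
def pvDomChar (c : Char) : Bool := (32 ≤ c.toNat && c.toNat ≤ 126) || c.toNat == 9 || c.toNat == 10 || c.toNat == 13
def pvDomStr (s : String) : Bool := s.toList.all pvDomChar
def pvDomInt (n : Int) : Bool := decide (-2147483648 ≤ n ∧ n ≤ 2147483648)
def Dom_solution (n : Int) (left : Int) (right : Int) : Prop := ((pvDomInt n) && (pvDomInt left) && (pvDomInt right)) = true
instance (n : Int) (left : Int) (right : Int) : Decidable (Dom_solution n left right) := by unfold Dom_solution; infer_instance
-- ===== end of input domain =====

-- B replaces the flat-index loop (// and % per element) by a row/column nested traversal; same cost, different decomposition.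

-- ===== PORT A =====
def solution (n : Int) (left : Int) (right : Int) : List Int :=
  (PySem.List.pyRange left (right + 1) 1).foldl
    (fun answer cur =>
      let i := PySem.Int.floordiv cur n
      let j := PySem.Int.mod cur n
      if i = j then answer ++ [i + 1] else answer ++ [max i j + 1])
    []

-- ===== PORT B =====
def solution_alt (n : Int) (left : Int) (right : Int) : List Int :=
  let start_row := PySem.Int.floordiv left n
  let end_row := PySem.Int.floordiv right n
  (PySem.List.pyRange start_row (end_row + 1) 1).foldl
    (fun answer i =>
      let col_lo := if i = start_row then PySem.Int.mod left n else 0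
      let col_hi := if i = end_row then PySem.Int.mod right n else n - 1
      (PySem.List.pyRange col_lo (col_hi + 1) 1).foldl
        (fun answer j => answer ++ [max i j + 1]) answer)
    []

-- ===== PRECONDITION & SPEC =====
-- Pre_ restricts to positive n, the natural domain of an n×n matrix: on n = 0 A raises
-- ZeroDivisionError, and negative n is outside the task's domain (A merely emits floor-division
-- artefacts there), so B does not reproduce it.
def Pre_solution (n : Int) (left : Int) (right : Int) : Prop := 1 ≤ n
instance (n : Int) (left : Int) (right : Int) : Decidable (Pre_solution n left right) := by unfold Pre_solution; infer_instance
def pvWitness_solution : Int × Int × Int := (3, 2, 5)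

def Spec_solution (n : Int) (left : Int) (right : Int) (out : List Int) : Prop := out = solution_alt n left right
instance (n : Int) (left : Int) (right : Int) (out : List Int) : Decidable (Spec_solution n left right out) := by unfold Spec_solution; infer_instance

-- ===== CLAIM (what is proved, stated in full; the proofs are below) =====
def Claim_equal_solution : Prop := ∀ (n : Int) (left : Int) (right : Int), Dom_solution n left right → Pre_solution n left right → Spec_solution n left right (solution n left right)

-- ===== LEMMAS AND PROOFS =====

-- the per-element value both programs append
def pvCell (n cur : Int) : Int := max (PySem.Int.floordiv cur n) (PySem.Int.mod cur n) + 1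

theorem solution_eq_map (n left right : Int) :
    solution n left right = (PySem.List.pyRange left (right + 1) 1).map (pvCell n) := by
  unfold solution
  have h : (fun (answer : List Int) cur =>
      let i := PySem.Int.floordiv cur n
      let j := PySem.Int.mod cur n
      if i = j then answer ++ [i + 1] else answer ++ [max i j + 1])
      = fun (answer : List Int) cur => answer ++ [pvCell n cur] := by
    funext answer cur
    by_cases h : PySem.Int.floordiv cur n = PySem.Int.mod cur n <;>
      simp [pvCell, h]
  rw [h, PySem.List.foldl_append_singleton_eq_map]
  simp

theorem solution_alt_eq_flatMap (n left right : Int) :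
    solution_alt n left right =
      (PySem.List.pyRange (PySem.Int.floordiv left n) (PySem.Int.floordiv right n + 1) 1).flatMap
        (fun i =>
          (PySem.List.pyRange
              (if i = PySem.Int.floordiv left n then PySem.Int.mod left n else 0)
              ((if i = PySem.Int.floordiv right n then PySem.Int.mod right n else n - 1) + 1) 1).map
            (fun j => max i j + 1)) := by
  show (PySem.List.pyRange (PySem.Int.floordiv left n) (PySem.Int.floordiv right n + 1) 1).foldl
      (fun answer i =>
        (PySem.List.pyRange (if i = PySem.Int.floordiv left n then PySem.Int.mod left n else 0)
            ((if i = PySem.Int.floordiv right n then PySem.Int.mod right n else n - 1) + 1) 1).foldl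
          (fun answer j => answer ++ [max i j + 1]) answer) [] = _
  have h : ∀ (answer : List Int) (i : Int),
      (PySem.List.pyRange (if i = PySem.Int.floordiv left n then PySem.Int.mod left n else 0)
          ((if i = PySem.Int.floordiv right n then PySem.Int.mod right n else n - 1) + 1) 1).foldl
        (fun answer j => answer ++ [max i j + 1]) answer
      = answer ++
        (PySem.List.pyRange (if i = PySem.Int.floordiv left n then PySem.Int.mod left n else 0)
            ((if i = PySem.Int.floordiv right n then PySem.Int.mod right n else n - 1) + 1) 1).map
          (fun j => max i j + 1) := by
    intro answer i
    exact PySem.List.foldl_append_singleton_eq_map _ _ _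
  simp only [h]
  rw [PySem.List.foldl_append_eq_flatMap]
  simp

-- one full-or-partial row of flat indices maps to the corresponding column range
theorem row_map (n i lo hi : Int) (hn : 0 < n) (hlo : 0 ≤ lo) (hhi : hi < n) :
    (PySem.List.pyRange (i * n + lo) (i * n + hi + 1) 1).map (pvCell n)
      = (PySem.List.pyRange lo (hi + 1) 1).map (fun j => max i j + 1) := by
  rw [PySem.List.pyRange_one, PySem.List.pyRange_one]
  have hlen : (i * n + hi + 1 - (i * n + lo)) = (hi + 1 - lo) := by ring
  rw [hlen, List.map_map, List.map_map]
  apply List.map_congr_left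
  intro k hk
  have hk' : (k : Int) < hi + 1 - lo := by
    have := List.mem_range.mp hk
    omega
  have hjlo : (0:Int) ≤ lo + k := by omega
  have hjhi : lo + (k : Int) < n := by omega
  have hfd : PySem.Int.floordiv (i * n + lo + k) n = i := by
    rw [PySem.Int.floordiv_eq_iff_of_pos hn]
    constructor
    · nlinarith
    · nlinarith
  have hmd : PySem.Int.mod (i * n + lo + k) n = lo + k := by
    have h2 := PySem.Int.floordiv_mul_add_mod (i * n + lo + k) n
    rw [hfd] at h2
    linarith
  simp [pvCell, hfd, hmd]

theorem flatMap_congr_mem {α β : Type} (l : List α) (f g : α → List β)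
    (h : ∀ x ∈ l, f x = g x) : l.flatMap f = l.flatMap g := by
  induction l with
  | nil => rfl
  | cons a t ih =>
    simp only [List.flatMap_cons]
    rw [h a (by simp), ih (fun x hx => h x (by simp [hx]))]

-- main decomposition, by induction on the number of rows after the first
theorem rows_decomp (n right : Int) (hn : 0 < n) :
    ∀ (k : Nat) (left : Int),
      PySem.Int.floordiv right n - PySem.Int.floordiv left n = (k : Int) →
      (PySem.List.pyRange left (right + 1) 1).map (pvCell n)
        = (PySem.List.pyRange (PySem.Int.floordiv left n) (PySem.Int.floordiv right n + 1) 1).flatMap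
            (fun i =>
              (PySem.List.pyRange
                  (if i = PySem.Int.floordiv left n then PySem.Int.mod left n else 0)
                  ((if i = PySem.Int.floordiv right n then PySem.Int.mod right n else n - 1) + 1) 1).map
                (fun j => max i j + 1)) := by
  intro k
  induction k with
  | zero =>
    intro left hk
    set sr := PySem.Int.floordiv left n with hsr
    have her : PySem.Int.floordiv right n = sr := by omega
    rw [her, PySem.List.pyRange_one_singleton]
    simp only [List.flatMap_cons, List.flatMap_nil, List.append_nil, if_true]
    have hL : left = sr * n + PySem.Int.mod left n := by
      have h2 := PySem.Int.floordiv_mul_add_mod left n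
      rw [← hsr] at h2
      linarith
    have hR : right = sr * n + PySem.Int.mod right n := by
      have h2 := PySem.Int.floordiv_mul_add_mod right n
      rw [her] at h2
      linarith
    calc (PySem.List.pyRange left (right + 1) 1).map (pvCell n)
        = (PySem.List.pyRange (sr * n + PySem.Int.mod left n)
            (sr * n + PySem.Int.mod right n + 1) 1).map (pvCell n) := by
          rw [← hL, ← hR]
      _ = _ := row_map n sr _ _ hn (PySem.Int.mod_nonneg _ hn) (PySem.Int.mod_lt _ hn)
  | succ k ih =>
    intro left hk
    set sr := PySem.Int.floordiv left n with hsr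
    set er := PySem.Int.floordiv right n with her
    have hsre : sr < er := by omega
    have hL : left = sr * n + PySem.Int.mod left n := by
      have h2 := PySem.Int.floordiv_mul_add_mod left n
      rw [← hsr] at h2
      linarith
    have hR : right = er * n + PySem.Int.mod right n := by
      have h2 := PySem.Int.floordiv_mul_add_mod right n
      rw [← her] at h2
      linarith
    have hmL0 : 0 ≤ PySem.Int.mod left n := PySem.Int.mod_nonneg _ hn
    have hmLn : PySem.Int.mod left n < n := PySem.Int.mod_lt _ hn
    have hmR0 : 0 ≤ PySem.Int.mod right n := PySem.Int.mod_nonneg _ hn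
    -- the boundary m between the first row and the rest
    set m := (sr + 1) * n with hm
    have hfm : PySem.Int.floordiv m n = sr + 1 := by
      rw [PySem.Int.floordiv_eq_iff_of_pos hn]
      constructor
      · exact le_refl _
      · nlinarith
    have hmm : PySem.Int.mod m n = 0 := by
      have h2 := PySem.Int.floordiv_mul_add_mod m n
      rw [hfm] at h2
      linarith
    have hlm : left < m := by nlinarith
    have hmr : m ≤ right + 1 := by nlinarith [mul_le_mul_of_nonneg_right (show sr + 1 ≤ er by omega) (le_of_lt hn)]
    rw [PySem.List.pyRange_one_append left m (right + 1) (le_of_lt hlm) hmr, List.map_append]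
    have hchunk1 : (PySem.List.pyRange left m 1).map (pvCell n)
        = (PySem.List.pyRange (PySem.Int.mod left n) (n - 1 + 1) 1).map (fun j => max sr j + 1) := by
      have hm' : m = sr * n + (n - 1) + 1 := by rw [hm]; ring
      rw [hm']
      conv_lhs => rw [hL]
      exact row_map n sr (PySem.Int.mod left n) (n - 1) hn hmL0 (by omega)
    have hchunk2 := ih m (by omega)
    rw [hchunk1, hchunk2, hfm]
    -- outer row list splits off sr
    rw [PySem.List.pyRange_one_cons (show sr < er + 1 by omega)]
    simp only [List.flatMap_cons, if_true]
    have hsrer : sr ≠ er := by omega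
    rw [if_neg hsrer]
    congr 1
    apply flatMap_congr_mem
    intro i hi
    have hi' := PySem.List.mem_pyRange_one.mp hi
    have h1 : (if i = sr + 1 then PySem.Int.mod m n else 0) = (if i = sr then PySem.Int.mod left n else 0) := by
      by_cases hcase : i = sr + 1
      · rw [if_pos hcase, hmm, if_neg (by omega)]
      · rw [if_neg hcase, if_neg (by omega)]
    rw [h1]

-- ===== VERDICT (by name: the statement is the Claim_ definition above) =====
theorem solution_spec : Claim_equal_solution := by
  intro n left right _ hpre
  unfold Spec_solution
  have h1 : (1:Int) ≤ n := hpre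
  have hn : (0:Int) < n := by omega
  rw [solution_eq_map, solution_alt_eq_flatMap]
  by_cases hc : PySem.Int.floordiv left n ≤ PySem.Int.floordiv right n
  · exact rows_decomp n right hn (PySem.Int.floordiv right n - PySem.Int.floordiv left n).toNat
      left (by omega)
  · -- both sides empty: a larger starting row forces right < left
    have hrl : right < left := by
      by_contra h
      push Not at h
      have hL := PySem.Int.floordiv_mul_add_mod left n
      have hR := PySem.Int.floordiv_mul_add_mod right n
      have hmLn : PySem.Int.mod left n < n := PySem.Int.mod_lt _ hn
      have hmR0 : 0 ≤ PySem.Int.mod right n := PySem.Int.mod_nonneg _ hn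
      have hmL0 : 0 ≤ PySem.Int.mod left n := PySem.Int.mod_nonneg _ hn
      have hlt : PySem.Int.floordiv right n + 1 ≤ PySem.Int.floordiv left n := by omega
      have hprod : (PySem.Int.floordiv right n + 1) * n ≤ PySem.Int.floordiv left n * n :=
        mul_le_mul_of_nonneg_right hlt (le_of_lt hn)
      have hmRn : PySem.Int.mod right n < n := PySem.Int.mod_lt _ hn
      linarith
    rw [PySem.List.pyRange_one_eq_nil (by omega), PySem.List.pyRange_one_eq_nil (by omega)]
    simp
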